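-- pv_equiv track=rewrite | github.com/bmtazbiulhassan/atspm_performance_measures | src/components/feature_extraction/feature_extraction.py | _remove_common_periods
-- ===== SOURCE A (Python) =====
-- def _remove_common_periods(dict_data: dict):
--     """
--     Removes common periods between the time intervals of different keys in a dictionary.
--
--     Parameters:
--     -----------
--     dict_data : dict
--         A dictionary where each key contains a list of tuples representing time intervals (start, end).
--
--     Returns:
--     --------
--     dict
--         The modified dictionary where overlapping periods are removed or adjusted to ensure no common periods exist.
--     """
--     # Helper function to check if two periods overlap
--     def is_overlap(period1: tuple, period2: tuple):
--         """
--         Checks if two time periods overlap.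
--
--         Parameters:
--         -----------
--         period1, period2 : tuple
--             Time intervals in the form (start, end).
--
--         Returns:
--         --------
--         bool
--             True if the periods overlap, otherwise False.
--         """
--         return max(period1[0], period2[0]) < min(period1[1], period2[1])
--
--     # Helper function to adjust overlapping periods
--     def adjust_periods(period1: tuple, period2: tuple):
--         """
--         Adjusts a period to remove overlaps with another period.
--
--         Parameters:
--         -----------
--         period1 : tuple
--             The time period to adjust.
--         period2 : tuple
--             The time period to compare against.
--
--         Returns:
--         --------
--         list
--             A list of adjusted time intervals with overlaps removed.
--         """
--         if is_overlap(period1, period2):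
--             # Case 1: period1 fully contains period2
--             if period1[0] < period2[0] and period1[1] > period2[1]:
--                 return [(period1[0], period2[0]), (period2[1], period1[1])]
--             # Case 2: Overlap at the start
--             elif period2[0] <= period1[0] < period2[1]:
--                 return [(period2[1], period1[1])]
--             # Case 3: Overlap at the end
--             elif period2[0] < period1[1] <= period2[1]:
--                 return [(period1[0], period2[0])]
--         # No overlap case
--         return [period1]
--
--     # Extract keys for pairwise comparison
--     keys = list(dict_data.keys())
--
--     # Iterate through all pairs of keys
--     for i, key1 in enumerate(keys):
--         for j, key2 in enumerate(keys):
--             # Avoid duplicate or self-comparisons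
--             if i >= j:
--                 continue
--
--             # Initialize a list to store adjusted periods for key1
--             new_periods_key1 = []
--
--             # Iterate through periods of key1
--             for period1 in dict_data[key1]:
--                 # Start with the current period
--                 adjusted_periods = [period1]
--
--                 # Compare with periods of key2
--                 for period2 in dict_data[key2]:
--                     # Adjust the periods to remove overlaps
--                     temp = []
--                     for p in adjusted_periods:
--                         temp.extend(adjust_periods(p, period2))
--                     adjusted_periods = temp
--
--                 # Add the adjusted periods to the result
--                 new_periods_key1.extend(adjusted_periods)
--
--             # Update the periods for key1
--             dict_data[key1] = new_periods_key1
--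
--     return dict_data
-- ===== SOURCE B (Python) =====
-- def _remove_common_periods(dict_data: dict):
--     def subtract(p, qs):
--         out = []
--         pending = [(p, 0)]
--         while pending:
--             piece, k = pending.pop()
--             while k < len(qs):
--                 q = qs[k]
--                 k += 1
--                 lo, hi, q0, q1 = piece[0], piece[1], q[0], q[1]
--                 if max(lo, q0) < min(hi, q1):
--                     if lo < q0 and hi > q1:
--                         pending.append(((q1, hi), k))
--                         piece = (lo, q0)
--                     elif q0 <= lo:
--                         piece = (q1, hi)
--                     else:
--                         piece = (lo, q0)
--             out.append(piece)
--         return out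
--
--     acc = []
--     for key in reversed(list(dict_data)):
--         periods = dict_data[key]
--         dict_data[key] = [piece for p in periods for piece in subtract(p, acc)]
--         acc = periods + acc
--     return dict_data
-- ===== Notes on version B (the rewrite author's own statement) =====
-- stated objective: faster
-- what changed: Replaces A's O(K^2) key-pair loop with one reverse pass that accumulates the later keys' period list once, and replaces A's breadth-first rebuild of the whole piece list for every period2 with a depth-first explicit-stack subtraction that carries each piece through the remaining periods without reallocating the piece list per period2.
import Mathlib
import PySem

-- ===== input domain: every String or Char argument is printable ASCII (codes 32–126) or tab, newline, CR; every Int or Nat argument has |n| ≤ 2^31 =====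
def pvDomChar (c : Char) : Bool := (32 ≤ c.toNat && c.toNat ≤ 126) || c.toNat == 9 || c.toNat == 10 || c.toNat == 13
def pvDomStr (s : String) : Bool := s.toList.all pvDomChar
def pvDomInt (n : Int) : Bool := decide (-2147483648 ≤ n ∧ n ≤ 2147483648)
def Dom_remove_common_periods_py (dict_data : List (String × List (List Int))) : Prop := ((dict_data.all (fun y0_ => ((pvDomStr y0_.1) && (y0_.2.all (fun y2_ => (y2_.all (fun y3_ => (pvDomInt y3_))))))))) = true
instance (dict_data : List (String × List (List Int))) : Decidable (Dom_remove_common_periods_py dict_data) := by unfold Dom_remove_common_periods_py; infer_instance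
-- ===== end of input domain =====

-- B replaces A's O(K^2) key-pair loop by one reverse pass accumulating the later keys'
-- periods, and A's breadth-first per-period2 piece-list rebuild by a depth-first
-- explicit-stack subtraction; return-value equivalence (both Pythons mutate dict_data in place).


-- ===== PORT A =====
-- helper is_overlap (list indexing totalized with default 0; Pre_ excludes exactly
-- the inputs where the Python indexing raises IndexError)
def pvIsOverlap (p1 p2 : List Int) : Bool :=
  decide (max (PySem.List.pyGetD p1 0 0) (PySem.List.pyGetD p2 0 0)
        < min (PySem.List.pyGetD p1 1 0) (PySem.List.pyGetD p2 1 0))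

-- helper adjust_periods
def pvAdjustPeriods (p1 p2 : List Int) : List (List Int) :=
  let a := PySem.List.pyGetD p1 0 0
  let b := PySem.List.pyGetD p1 1 0
  let c := PySem.List.pyGetD p2 0 0
  let d := PySem.List.pyGetD p2 1 0
  if pvIsOverlap p1 p2 then
    if a < c ∧ b > d then [[a, c], [d, b]]
    else if c ≤ a ∧ a < d then [[d, b]]
    else if c < b ∧ b ≤ d then [[a, c]]
    else [p1]
  else [p1]

def remove_common_periods_py (dict_data : List (String × List (List Int))) : List (String × List (List Int)) :=
  let d0 := PySem.Dict.ofList dict_data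
  let keys := PySem.Dict.keys d0
  let dfin := (PySem.List.enumerate keys 0).foldl (fun d ik =>
    (PySem.List.enumerate keys 0).foldl (fun d jk =>
      if ik.1 ≥ jk.1 then d
      else
        let new1 := (PySem.Dict.getD d ik.2 []).foldl (fun acc p1 =>
          acc ++ (PySem.Dict.getD d jk.2 []).foldl (fun adjusted p2 =>
            adjusted.foldl (fun temp p => temp ++ pvAdjustPeriods p p2) []) [p1]) []
        PySem.Dict.insert d ik.2 new1) d) d0
  dfin.items

-- ===== PORT B =====
-- Source B's inner `while k < len(qs)` loop for one stack entry: follows the current piece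
-- through the remaining periods, returning the finished piece and the entries pushed on
-- the stack (latest push first; an entry = piece together with its remaining qs suffix,
-- Source B's index k).
def pvPieceLoop (piece : List Int) (qs : List (List Int)) :
    List Int × List (List Int × List (List Int)) :=
  match qs with
  | [] => (piece, [])
  | q :: rest =>
    let lo := PySem.List.pyGetD piece 0 0
    let hi := PySem.List.pyGetD piece 1 0
    let q0 := PySem.List.pyGetD q 0 0
    let q1 := PySem.List.pyGetD q 1 0
    if max lo q0 < min hi q1 then
      if lo < q0 ∧ hi > q1 then
        let r := pvPieceLoop [lo, q0] rest
        (r.1, r.2 ++ [([q1, hi], rest)])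
      else if q0 ≤ lo then pvPieceLoop [q1, hi] rest
      else pvPieceLoop [lo, q0] rest
    else pvPieceLoop piece rest

def pvMeasure (pending : List (List Int × List (List Int))) : Nat :=
  (pending.map (fun e => 3 ^ e.2.length)).sum

-- termination bound for the worklist loop (cited by pvDrain's decreasing_by)
theorem pvPieceLoop_measure (qs : List (List Int)) : ∀ (piece : List Int),
    pvMeasure (pvPieceLoop piece qs).2 < 3 ^ qs.length := by
  induction qs with
  | nil => intro piece; simp [pvPieceLoop, pvMeasure]
  | cons q rest ih =>
    intro piece
    simp only [pvPieceLoop]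
    have h3 : 0 < 3 ^ rest.length := by positivity
    split
    · split
      · have := ih [PySem.List.pyGetD piece 0 0, PySem.List.pyGetD q 0 0]
        simp only [pvMeasure, List.map_append, List.sum_append] at *
        simp only [List.length_cons, pow_succ]
        simp
        omega
      · split
        · exact lt_trans (ih _) (by simp [pow_succ])
        · exact lt_trans (ih _) (by simp [pow_succ])
    · exact lt_trans (ih _) (by simp [pow_succ])

-- Source B's `while pending` worklist loop
def pvDrain : List (List Int × List (List Int)) → List (List Int)
  | [] => []
  | (pc, sfx) :: t =>
    (pvPieceLoop pc sfx).1 :: pvDrain ((pvPieceLoop pc sfx).2 ++ t)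
termination_by pending => pvMeasure pending
decreasing_by
  simp only [pvMeasure, List.map_append, List.sum_append, List.map_cons, List.sum_cons]
  have := pvPieceLoop_measure sfx pc
  simp only [pvMeasure] at this
  omega

-- Source B's subtract(p, qs)
def pvSubtract (p : List Int) (qs : List (List Int)) : List (List Int) :=
  pvDrain [(p, qs)]

-- Source B's `for key in reversed(list(dict_data))` pass: processes the tail first and
-- threads acc (the concatenated periods of all later keys) back to the front.
def pvGoB : List (String × List (List Int)) → List (List Int) →
    List (String × List (List Int)) × List (List Int)
  | [], acc => ([], acc)
  | kv :: rest, acc =>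
    let r := pvGoB rest acc
    ((kv.1, kv.2.flatMap (fun p => pvSubtract p r.2)) :: r.1, kv.2 ++ r.2)

def remove_common_periods_py_alt (dict_data : List (String × List (List Int))) : List (String × List (List Int)) :=
  (pvGoB (PySem.Dict.ofList dict_data).items []).1

-- ===== PRECONDITION & SPEC =====
def pvHasShort (v : List (List Int)) : Bool := v.any (fun p => decide (p.length < 2))

-- Pre_ excludes exactly the inputs on which the Python A raises IndexError: after dict
-- construction there are two keys i < j such that key i has a period of fewer than two
-- entries and key j's list is nonempty, or key i's list is nonempty and key j has such a
-- short period (only then is a short period ever indexed).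
def Pre_remove_common_periods_py (dict_data : List (String × List (List Int))) : Prop :=
  ((PySem.Dict.ofList dict_data).values).Pairwise
    (fun v1 v2 => (pvHasShort v1 = true → v2 = []) ∧ (v1 ≠ [] → pvHasShort v2 = false))
instance (dict_data : List (String × List (List Int))) : Decidable (Pre_remove_common_periods_py dict_data) := by unfold Pre_remove_common_periods_py; infer_instance

def pvWitness_remove_common_periods_py : (List (String × List (List Int))) :=
  [("a", [[0, 4]]), ("b", [[1, 2]])]

def Spec_remove_common_periods_py (dict_data : List (String × List (List Int))) (out : List (String × List (List Int))) : Prop := out = remove_common_periods_py_alt dict_data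
instance (dict_data : List (String × List (List Int))) (out : List (String × List (List Int))) : Decidable (Spec_remove_common_periods_py dict_data out) := by unfold Spec_remove_common_periods_py; infer_instance

-- ===== CLAIM (what is proved, stated in full; the proofs are below) =====
def Claim_equal_remove_common_periods_py : Prop := ∀ (dict_data : List (String × List (List Int))), Dom_remove_common_periods_py dict_data → Pre_remove_common_periods_py dict_data → Spec_remove_common_periods_py dict_data (remove_common_periods_py dict_data)

-- ===== LEMMAS AND PROOFS =====

-- the common recursive form of the per-period subtraction: A's breadth-first rebuild and
-- B's depth-first worklist both compute this tree, leaves left to right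
def pvR : List Int → List (List Int) → List (List Int)
  | p, [] => [p]
  | p, q :: qs => (pvAdjustPeriods p q).flatMap (fun x => pvR x qs)

def pvSubA (ps qs : List (List Int)) : List (List Int) := ps.flatMap (fun p => pvR p qs)

-- the shared specification of the whole function: each key's periods minus the
-- concatenated periods of the later keys (plus an outer accumulator acc)
def pvSpecF : List (String × List (List Int)) → List (List Int) → List (String × List (List Int))
  | [], _ => []
  | kv :: rest, acc =>
    (kv.1, pvSubA kv.2 (((rest.map (fun e => e.2)).flatten) ++ acc)) :: pvSpecF rest acc

theorem pvAdjust_eq (p q : List Int) :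
    pvAdjustPeriods p q =
      (if max (PySem.List.pyGetD p 0 0) (PySem.List.pyGetD q 0 0)
          < min (PySem.List.pyGetD p 1 0) (PySem.List.pyGetD q 1 0) then
        if PySem.List.pyGetD p 0 0 < PySem.List.pyGetD q 0 0 ∧
            PySem.List.pyGetD p 1 0 > PySem.List.pyGetD q 1 0 then
          [[PySem.List.pyGetD p 0 0, PySem.List.pyGetD q 0 0],
           [PySem.List.pyGetD q 1 0, PySem.List.pyGetD p 1 0]]
        else if PySem.List.pyGetD q 0 0 ≤ PySem.List.pyGetD p 0 0 then
          [[PySem.List.pyGetD q 1 0, PySem.List.pyGetD p 1 0]]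
        else [[PySem.List.pyGetD p 0 0, PySem.List.pyGetD q 0 0]]
      else [p]) := by
  simp only [pvAdjustPeriods, pvIsOverlap, decide_eq_true_eq]
  split_ifs <;> first | rfl | omega

theorem pvPieceLoop_spec (qs : List (List Int)) : ∀ (piece : List Int),
    pvR piece qs =
      (pvPieceLoop piece qs).1 ::
        ((pvPieceLoop piece qs).2.map (fun e => pvR e.1 e.2)).flatten := by
  induction qs with
  | nil => intro piece; simp [pvR, pvPieceLoop]
  | cons q rest ih =>
    intro piece
    rw [show pvR piece (q :: rest) = (pvAdjustPeriods piece q).flatMap (fun x => pvR x rest) from rfl]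
    rw [pvAdjust_eq]
    simp only [pvPieceLoop]
    split
    · split
      · simp only [List.flatMap_cons, List.flatMap_nil, List.append_nil,
          List.map_append, List.flatten_append, List.map_cons, List.map_nil,
          List.flatten_cons, List.flatten_nil]
        rw [ih]
        simp
      · split
        · simp only [List.flatMap_cons, List.flatMap_nil, List.append_nil]; exact ih _
        · simp only [List.flatMap_cons, List.flatMap_nil, List.append_nil]; exact ih _
    · simp only [List.flatMap_cons, List.flatMap_nil, List.append_nil]; exact ih _

theorem pvDrain_spec : ∀ (pending : List (List Int × List (List Int))),
    pvDrain pending = (pending.map (fun e => pvR e.1 e.2)).flatten := by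
  intro pending
  induction pending using pvDrain.induct with
  | case1 => simp [pvDrain]
  | case2 pc sfx t ih =>
    rw [pvDrain, ih]
    simp only [List.map_cons, List.flatten_cons, List.map_append, List.flatten_append]
    rw [pvPieceLoop_spec]
    simp

theorem pvSubtract_eq (p : List Int) (qs : List (List Int)) :
    pvSubtract p qs = pvR p qs := by
  rw [pvSubtract, pvDrain_spec]; simp

theorem pvR_append (qs1 : List (List Int)) : ∀ (p : List Int) (qs2 : List (List Int)),
    pvR p (qs1 ++ qs2) = (pvR p qs1).flatMap (fun x => pvR x qs2) := by
  induction qs1 with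
  | nil => intro p qs2; simp [pvR]
  | cons q rest ih =>
    intro p qs2
    simp only [List.cons_append, pvR, List.flatMap_assoc]
    exact List.flatMap_congr (fun x _ => ih x qs2)

theorem pvSubA_nil (ps : List (List Int)) : pvSubA ps [] = ps := by
  simp [pvSubA, pvR]

theorem pvSubA_append (ps a b : List (List Int)) :
    pvSubA (pvSubA ps a) b = pvSubA ps (a ++ b) := by
  simp only [pvSubA, List.flatMap_assoc]
  exact List.flatMap_congr (fun x _ => (pvR_append a x b).symm)

theorem pvChain (L : List (List (List Int))) : ∀ (v : List (List Int)),
    L.foldl (fun v qs => pvSubA v qs) v = pvSubA v L.flatten := by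
  induction L with
  | nil => intro v; simp [pvSubA_nil]
  | cons a L ih => intro v; simp only [List.foldl_cons, ih, List.flatten_cons, pvSubA_append]

theorem pvMid (qs : List (List Int)) : ∀ (pieces : List (List Int)),
    qs.foldl (fun adjusted p2 =>
        adjusted.foldl (fun temp p => temp ++ pvAdjustPeriods p p2) []) pieces
      = pieces.flatMap (fun p => pvR p qs) := by
  induction qs with
  | nil => intro pieces; simp [pvR]
  | cons q rest ih =>
    intro pieces
    simp only [List.foldl_cons]
    rw [PySem.List.foldl_append_eq_flatMap (fun p => pvAdjustPeriods p q) pieces []]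
    rw [List.nil_append, ih, List.flatMap_assoc]
    rfl

theorem pvSubA_port (ps qs : List (List Int)) :
    ps.foldl (fun acc p1 =>
        acc ++ qs.foldl (fun adjusted p2 =>
          adjusted.foldl (fun temp p => temp ++ pvAdjustPeriods p p2) []) [p1]) []
      = pvSubA ps qs := by
  rw [PySem.List.foldl_append_eq_flatMap
    (fun p1 => qs.foldl (fun adjusted p2 =>
      adjusted.foldl (fun temp p => temp ++ pvAdjustPeriods p p2) []) [p1]) ps []]
  rw [List.nil_append, pvSubA]
  exact List.flatMap_congr (fun p _ => by rw [pvMid]; simp)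

theorem pvFoldlFixed {α β : Type} (l : List α) (f : β → α → β) (s : β)
    (h : ∀ (s' : β), ∀ x ∈ l, f s' x = s') : l.foldl f s = s := by
  induction l generalizing s with
  | nil => rfl
  | cons x t ih =>
    rw [List.foldl_cons, h s x List.mem_cons_self]
    exact ih s (fun s' y hy => h s' y (List.mem_cons_of_mem x hy))

theorem pvInsertGetDSelf (d : PySem.Dict String (List (List Int))) (k : String)
    (hnd : d.keys.Nodup) (hc : d.contains k = true) :
    d.insert k (d.getD k []) = d := by
  obtain ⟨v, hv⟩ : ∃ v, d.get? k = some v := by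
    rw [PySem.Dict.contains_eq_isSome_get?, Option.isSome_iff_exists] at hc
    exact hc
  have hgd : d.getD k [] = v := by rw [PySem.Dict.getD_eq_get?_getD, hv]; rfl
  apply PySem.Dict.ext
  rw [PySem.Dict.items_insert_of_contains d _ hc]
  have hid : ∀ p ∈ d.items,
      (if (p.1 == k) = true then (k, d.getD k []) else p) = id p := by
    intro p hp
    by_cases hb : (p.1 == k) = true
    · obtain ⟨p1, p2⟩ := p
      have hk1 : p1 = k := eq_of_beq hb
      subst hk1
      have hg := PySem.Dict.get?_of_mem_items d hp hnd
      rw [hg] at hv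
      have hvv : p2 = v := Option.some.inj hv
      simp [hgd, hvv]
    · simp [hb]
  rw [List.map_congr_left hid, List.map_id]

theorem pvInnerChain (tail : List String) :
    ∀ (d : PySem.Dict String (List (List Int))) (key1 : String),
    d.keys.Nodup → d.contains key1 = true → key1 ∉ tail →
    tail.foldl (fun d k2 =>
        d.insert key1 (pvSubA (d.getD key1 []) (d.getD k2 []))) d
      = d.insert key1
          (tail.foldl (fun v k2 => pvSubA v (d.getD k2 [])) (d.getD key1 [])) := by
  induction tail with
  | nil =>
    intro d key1 hnd hc _
    simp only [List.foldl_nil]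
    exact (pvInsertGetDSelf d key1 hnd hc).symm
  | cons k2 tail ih =>
    intro d key1 hnd hc hnot
    have hne : ∀ k ∈ tail, k ≠ key1 := by
      intro k hk he; exact hnot (he ▸ List.mem_cons_of_mem k2 hk)
    simp only [List.foldl_cons]
    rw [ih (d.insert key1 (pvSubA (d.getD key1 []) (d.getD k2 []))) key1
      (PySem.Dict.nodup_keys_insert d key1 _ hnd)
      (PySem.Dict.contains_insert_self d key1 _)
      (fun h => hnot (List.mem_cons_of_mem k2 h))]
    rw [PySem.Dict.insert_insert_self]
    congr 1
    rw [PySem.Dict.getD_insert_self]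
    exact PySem.List.foldl_congr_mem tail _ _ _
      (fun v k hk => by rw [PySem.Dict.getD_insert_of_ne d _ _ (hne k hk)])

theorem pvNotMemDrop (ks : List String) (i : Nat) (hi : i < ks.length)
    (hnd : ks.Nodup) : ks[i] ∉ ks.drop (i + 1) := by
  intro hmem
  obtain ⟨j, hj, hjq⟩ := List.mem_iff_getElem.mp hmem
  rw [List.getElem_drop] at hjq
  have hlt : i + 1 + j < ks.length := by
    have := hj; rw [List.length_drop] at this; omega
  have := (List.Nodup.getElem_inj_iff hnd).mp hjq
  omega

theorem pvInner (ks : List String) (i : Nat) (hi : i < ks.length)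
    (hnd : ks.Nodup) (d : PySem.Dict String (List (List Int))) (hk : d.keys = ks) :
    (PySem.List.enumerate ks 0).foldl (fun d jk =>
        if (i : Int) ≥ jk.1 then d
        else d.insert ks[i] (pvSubA (d.getD ks[i] []) (d.getD jk.2 []))) d
      = d.insert ks[i]
          (pvSubA (d.getD ks[i] [])
            (((ks.drop (i + 1)).map (fun k => d.getD k [])).flatten)) := by
  have htlen : (ks.take (i + 1)).length = i + 1 := by
    rw [List.length_take]; omega
  have hsplit : PySem.List.enumerate ks 0
      = PySem.List.enumerate (ks.take (i + 1)) 0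
        ++ PySem.List.enumerate (ks.drop (i + 1)) (0 + (ks.take (i + 1)).length) := by
    conv_lhs => rw [← List.take_append_drop (i + 1) ks]
    exact PySem.List.enumerate_append _ _ 0
  rw [hsplit, List.foldl_append]
  rw [pvFoldlFixed (PySem.List.enumerate (ks.take (i + 1)) 0) _ d (by
    intro s' jk hjk
    obtain ⟨k, hkk, hkeq⟩ := (PySem.List.mem_enumerate_iff _ _ _).mp hjk
    rw [htlen] at hkk
    have h1 : jk.1 = (k : Int) := by rw [hkeq]; push_cast; ring
    rw [if_pos (by rw [h1]; exact_mod_cast (by omega : k ≤ i))])]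
  have hcongr : List.foldl (fun d jk =>
        if (i : Int) ≥ jk.1 then d
        else d.insert ks[i] (pvSubA (d.getD ks[i] []) (d.getD jk.2 []))) d
        (PySem.List.enumerate (ks.drop (i + 1)) (0 + (ks.take (i + 1)).length))
      = List.foldl (fun d jk =>
        d.insert ks[i] (pvSubA (d.getD ks[i] []) (d.getD jk.2 []))) d
        (PySem.List.enumerate (ks.drop (i + 1)) (0 + (ks.take (i + 1)).length)) := by
    refine PySem.List.foldl_congr_mem _ _ _ _ ?_
    intro acc jk hjk
    obtain ⟨k, hkk, hkeq⟩ := (PySem.List.mem_enumerate_iff _ _ _).mp hjk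
    have h1 : jk.1 = ((i : Int) + 1 + k) := by rw [hkeq]; push_cast [htlen]; ring
    rw [if_neg (by rw [h1]; omega)]
  rw [hcongr]
  have hstep : List.foldl (fun d jk =>
        d.insert ks[i] (pvSubA (d.getD ks[i] []) (d.getD jk.2 []))) d
        (PySem.List.enumerate (ks.drop (i + 1)) (0 + (ks.take (i + 1)).length))
      = List.foldl (fun d k2 =>
        d.insert ks[i] (pvSubA (d.getD ks[i] []) (d.getD k2 []))) d (ks.drop (i + 1)) := by
    conv_rhs => rw [← PySem.List.map_snd_enumerate (ks.drop (i + 1)) (0 + (ks.take (i + 1)).length)]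
    rw [List.foldl_map]
  rw [hstep]
  have hndk : d.keys.Nodup := by rw [hk]; exact hnd
  have hck : d.contains ks[i] = true :=
    (PySem.Dict.contains_iff_mem_keys d ks[i]).mpr (by rw [hk]; exact List.getElem_mem hi)
  rw [pvInnerChain (ks.drop (i + 1)) d ks[i] hndk hck (pvNotMemDrop ks i hi hnd)]
  congr 1
  rw [← pvChain ((ks.drop (i + 1)).map (fun k => d.getD k [])) (d.getD ks[i] [])]
  rw [List.foldl_map]

def pvInnerFold (ks : List String) (d : PySem.Dict String (List (List Int)))
    (ik : Int × String) : PySem.Dict String (List (List Int)) :=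
  (PySem.List.enumerate ks 0).foldl (fun d jk =>
    if ik.1 ≥ jk.1 then d
    else d.insert ik.2 (pvSubA (d.getD ik.2 []) (d.getD jk.2 []))) d

def pvOuterFold (d0 : PySem.Dict String (List (List Int))) (n : Nat) :
    PySem.Dict String (List (List Int)) :=
  ((PySem.List.enumerate d0.keys 0).take n).foldl (pvInnerFold d0.keys) d0

theorem pvOuter (d0 : PySem.Dict String (List (List Int)))
    (hnd : d0.keys.Nodup) : ∀ (n : Nat), n ≤ d0.keys.length →
    (pvOuterFold d0 n).keys = d0.keys ∧
    ∀ (m : Nat) (hm : m < d0.keys.length),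
      (pvOuterFold d0 n).getD (d0.keys[m]'hm) [] =
        if m < n then
          pvSubA (d0.getD (d0.keys[m]'hm) [])
            (((d0.keys.drop (m + 1)).map (fun k => d0.getD k [])).flatten)
        else d0.getD (d0.keys[m]'hm) [] := by
  intro n
  induction n with
  | zero =>
    intro _
    constructor
    · rfl
    · intro m hm; simp [pvOuterFold]
  | succ n ih =>
    intro hn1
    have hn : n ≤ d0.keys.length := by omega
    have hkn : n < d0.keys.length := by omega
    obtain ⟨ihk, ihg⟩ := ih hn
    have hE : n < (PySem.List.enumerate d0.keys 0).length := by
      rw [PySem.List.length_enumerate]; omega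
    have hstep : pvOuterFold d0 (n + 1)
        = pvInnerFold d0.keys (pvOuterFold d0 n) (0 + (n : Int), d0.keys[n]'hkn) := by
      rw [pvOuterFold, List.take_add_one, List.getElem?_eq_getElem hE,
        PySem.List.getElem_enumerate, Option.toList_some, List.foldl_append,
        List.foldl_cons, List.foldl_nil, ← pvOuterFold]
    have hbr : ∀ (d : PySem.Dict String (List (List Int))), d.keys = d0.keys →
        pvInnerFold d0.keys d (0 + (n : Int), d0.keys[n]'hkn)
          = d.insert (d0.keys[n]'hkn)
              (pvSubA (d.getD (d0.keys[n]'hkn) [])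
                (((d0.keys.drop (n + 1)).map (fun k => d.getD k [])).flatten)) := by
      intro d hkd
      rw [pvInnerFold]
      have hin := pvInner d0.keys n hkn hnd d hkd
      simpa using hin
    rw [hstep, hbr (pvOuterFold d0 n) ihk]
    have hvn : (pvOuterFold d0 n).getD (d0.keys[n]'hkn) [] = d0.getD (d0.keys[n]'hkn) [] := by
      rw [ihg n hkn, if_neg (by omega)]
    have hmap : (d0.keys.drop (n + 1)).map (fun k => (pvOuterFold d0 n).getD k [])
        = (d0.keys.drop (n + 1)).map (fun k => d0.getD k []) := by
      apply List.map_congr_left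
      intro k hk
      obtain ⟨j, hj, hjk⟩ := List.mem_iff_getElem.mp hk
      rw [List.getElem_drop] at hjk
      have hjlen : n + 1 + j < d0.keys.length := by
        rw [List.length_drop] at hj; omega
      subst hjk
      rw [ihg (n + 1 + j) hjlen, if_neg (by omega)]
    have hcont : (pvOuterFold d0 n).contains (d0.keys[n]'hkn) = true :=
      (PySem.Dict.contains_iff_mem_keys _ _).mpr (by rw [ihk]; exact List.getElem_mem hkn)
    constructor
    · rw [PySem.Dict.keys_insert_of_contains _ _ hcont, ihk]
    · intro m hm
      by_cases hmn : m = n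
      · subst hmn
        rw [PySem.Dict.getD_insert_self, hvn, hmap, if_pos (by omega)]
      · have hne : d0.keys[m]'hm ≠ d0.keys[n]'hkn := by
          intro he
          exact hmn ((List.Nodup.getElem_inj_iff hnd).mp he)
        rw [PySem.Dict.getD_insert_of_ne _ _ _ hne, ihg m hm]
        have hiff : (m < n + 1) ↔ (m < n) := by omega
        simp only [hiff]

theorem pvSpecF_length (it : List (String × List (List Int))) (acc : List (List Int)) :
    (pvSpecF it acc).length = it.length := by
  induction it with
  | nil => rfl
  | cons kv rest ih => simp [pvSpecF, ih]

theorem pvSpecF_getElem (it : List (String × List (List Int))) (acc : List (List Int)) :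
    ∀ (m : Nat) (hm : m < it.length),
    (pvSpecF it acc)[m]'(by rw [pvSpecF_length]; exact hm)
      = (it[m].1, pvSubA it[m].2
          ((((it.drop (m + 1)).map (fun e => e.2)).flatten) ++ acc)) := by
  induction it with
  | nil => intro m hm; simp at hm
  | cons kv rest ih =>
    intro m hm
    cases m with
    | zero => simp [pvSpecF]
    | succ m =>
      simp only [pvSpecF, List.getElem_cons_succ, List.drop_succ_cons]
      exact ih m (by simpa using hm)

theorem pvPortA_fold (d0 : PySem.Dict String (List (List Int))) :
    (PySem.List.enumerate (PySem.Dict.keys d0) 0).foldl (fun d ik =>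
      (PySem.List.enumerate (PySem.Dict.keys d0) 0).foldl (fun d jk =>
        if ik.1 ≥ jk.1 then d
        else PySem.Dict.insert d ik.2 ((PySem.Dict.getD d ik.2 []).foldl (fun acc p1 =>
          acc ++ (PySem.Dict.getD d jk.2 []).foldl (fun adjusted p2 =>
            adjusted.foldl (fun temp p => temp ++ pvAdjustPeriods p p2) []) [p1]) [])) d) d0
      = pvOuterFold d0 d0.keys.length := by
  simp only [pvSubA_port]
  rw [pvOuterFold]
  rw [show (PySem.List.enumerate d0.keys 0).take d0.keys.length
      = PySem.List.enumerate d0.keys 0 from by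
    rw [← PySem.List.length_enumerate d0.keys 0]; exact List.take_length]
  rfl

theorem pvPortA_eq (dict_data : List (String × List (List Int))) :
    remove_common_periods_py dict_data
      = pvSpecF (PySem.Dict.ofList dict_data).items [] := by
  have hnd := PySem.Dict.nodup_keys_ofList dict_data
  have h0 : remove_common_periods_py dict_data
      = (pvOuterFold (PySem.Dict.ofList dict_data)
          (PySem.Dict.ofList dict_data).keys.length).items := by
    rw [← pvPortA_fold]; rfl
  rw [h0]
  obtain ⟨hkeys, hget⟩ := pvOuter (PySem.Dict.ofList dict_data) hnd
    (PySem.Dict.ofList dict_data).keys.length le_rfl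
  have hdf_items : (pvOuterFold (PySem.Dict.ofList dict_data)
      (PySem.Dict.ofList dict_data).keys.length).items
      = (PySem.Dict.ofList dict_data).keys.map (fun k =>
          (k, (pvOuterFold (PySem.Dict.ofList dict_data)
            (PySem.Dict.ofList dict_data).keys.length).getD k [])) := by
    have := PySem.Dict.items_eq_map_keys (pvOuterFold (PySem.Dict.ofList dict_data)
      (PySem.Dict.ofList dict_data).keys.length) (by rw [hkeys]; exact hnd) ([] : List (List Int))
    rw [this, hkeys]
  have h0items : (PySem.Dict.ofList dict_data).items
      = (PySem.Dict.ofList dict_data).keys.map (fun k =>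
          (k, (PySem.Dict.ofList dict_data).getD k [])) :=
    PySem.Dict.items_eq_map_keys _ hnd _
  apply List.ext_getElem
  · rw [hdf_items, List.length_map, pvSpecF_length, h0items, List.length_map]
  · intro m h1 h2
    have hm : m < (PySem.Dict.ofList dict_data).keys.length := by
      rw [hdf_items, List.length_map] at h1; exact h1
    have hmi : m < (PySem.Dict.ofList dict_data).items.length := by
      rw [h0items, List.length_map]; exact hm
    have hItems_m : (PySem.Dict.ofList dict_data).items[m]'hmi
        = ((PySem.Dict.ofList dict_data).keys[m]'hm,
           (PySem.Dict.ofList dict_data).getD ((PySem.Dict.ofList dict_data).keys[m]'hm) []) := by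
      simp only [List.getElem_of_eq h0items hmi, List.getElem_map]
    have hdrop : (PySem.Dict.ofList dict_data).items.drop (m + 1)
        = ((PySem.Dict.ofList dict_data).keys.drop (m + 1)).map (fun k =>
            (k, (PySem.Dict.ofList dict_data).getD k [])) := by
      rw [h0items]; exact (List.map_drop).symm
    rw [pvSpecF_getElem (PySem.Dict.ofList dict_data).items [] m hmi]
    rw [List.getElem_of_eq hdf_items h1, List.getElem_map]
    rw [hget m hm, if_pos hm, hItems_m, hdrop, List.map_map, List.append_nil]
    rfl

theorem pvGoB_spec (it : List (String × List (List Int))) (acc : List (List Int)) :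
    pvGoB it acc = (pvSpecF it acc, (it.map (fun e => e.2)).flatten ++ acc) := by
  induction it with
  | nil => simp [pvGoB, pvSpecF]
  | cons kv rest ih =>
    have hx : ∀ X, List.flatMap (fun p => pvSubtract p X) kv.2 = pvSubA kv.2 X := by
      intro X
      rw [pvSubA]
      exact List.flatMap_congr (fun p _ => pvSubtract_eq p X)
    simp only [pvGoB, ih, pvSpecF, List.map_cons, List.flatten_cons, List.append_assoc, hx]

theorem pvPortB_eq (dict_data : List (String × List (List Int))) :
    remove_common_periods_py_alt dict_data
      = pvSpecF (PySem.Dict.ofList dict_data).items [] := by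
  rw [remove_common_periods_py_alt, pvGoB_spec]

-- ===== VERDICT (by name: the statement is the Claim_ definition above) =====
theorem remove_common_periods_py_spec : Claim_equal_remove_common_periods_py := by
  intro dict_data _ _
  unfold Spec_remove_common_periods_py
  rw [pvPortA_eq, pvPortB_eq]
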